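-- pv_equiv track=rewrite | github.com/aschkor/dst_dedicated_server_manager | module/ssh.py | __escape_space
-- ===== SOURCE A (Python) =====
-- def __escape_space(s: str)-> str:
--     is_esc = False
--     res = ''
--     for c in s:
--         if c == ' ' and not is_esc:
--             res = res + '\ '
--         else:
--             res = res + c
--
--         is_esc = c == '\\'
--
--     return res
-- ===== SOURCE B (Python) =====
-- def __escape_space(s: str) -> str:
--     parts = s.split(' ')
--     res = parts[0]
--     for part in parts[1:]:
--         res += (' ' if res.endswith('\\') else '\\ ') + part
--     return res
-- ===== Notes on version B (the rewrite author's own statement) =====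
-- stated objective: faster
-- what changed: Replaces the stateful per-character scan with an is_esc flag by splitting the string on the space character and re-joining the parts, choosing each separator (plain space vs backslash-space) by whether the accumulated result ends with a backslash.
import Mathlib
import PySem

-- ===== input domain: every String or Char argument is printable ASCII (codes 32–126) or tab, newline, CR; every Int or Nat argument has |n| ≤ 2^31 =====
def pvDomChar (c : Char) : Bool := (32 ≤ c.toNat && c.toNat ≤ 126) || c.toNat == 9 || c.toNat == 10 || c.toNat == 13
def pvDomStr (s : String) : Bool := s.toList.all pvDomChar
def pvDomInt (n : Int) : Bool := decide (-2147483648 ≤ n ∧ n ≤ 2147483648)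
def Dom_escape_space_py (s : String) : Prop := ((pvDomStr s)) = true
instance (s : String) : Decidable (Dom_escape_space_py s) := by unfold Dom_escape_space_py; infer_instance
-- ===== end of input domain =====

-- B replaces A's stateful per-character scan by split-on-space + re-join (separator chosen by a trailing-backslash test); same return value, measured faster in a timing run (C-level split, fewer concatenations).

-- ===== PORT A =====
-- A: scan the characters keeping is_esc = "previous char was a backslash", appending '\ ' or the char.
def escape_space_py (s : String) : String :=
  let r := s.toList.foldl (fun (st : Bool × List Char) c =>
    (c == '\\', if c == ' ' && !st.1 then st.2 ++ ['\\', ' '] else st.2 ++ [c]))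
    (false, ([] : List Char))
  String.mk r.2

-- ===== PORT B =====
-- B: parts = s.split(' '); res = parts[0]; for part in parts[1:]: res += (' ' if res.endswith('\\') else '\\ ') + part
def escape_space_py_alt (s : String) : String :=
  match PySem.Chars.splitOn s.toList [' '] with
  | [] => ""   -- unreachable: Python's split always returns a non-empty list
  | p :: ps =>
    String.mk (ps.foldl (fun res part =>
      res ++ (if PySem.Chars.endswith res ['\\'] then [' '] else ['\\', ' ']) ++ part) p)

-- ===== PRECONDITION & SPEC =====
def Spec_escape_space_py (s : String) (out : String) : Prop := out = escape_space_py_alt s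
instance (s : String) (out : String) : Decidable (Spec_escape_space_py s out) := by unfold Spec_escape_space_py; infer_instance

-- ===== CLAIM (what is proved, stated in full; the proofs are below) =====
def Claim_equal_escape_space_py : Prop := ∀ (s : String), Dom_escape_space_py s → Spec_escape_space_py s (escape_space_py s)

-- ===== LEMMAS AND PROOFS =====

-- Reference form of A's scan: the escaped string produced from escape-state `esc`.
def fRef (esc : Bool) : List Char → List Char
  | [] => []
  | c :: r => (if c == ' ' && !esc then ['\\', ' '] else [c]) ++ fRef (c == '\\') r

-- A's foldl equals the reference form.
theorem aFold_eq (l : List Char) : ∀ (esc : Bool) (acc : List Char),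
    (l.foldl (fun (st : Bool × List Char) c =>
      (c == '\\', if c == ' ' && !st.1 then st.2 ++ ['\\', ' '] else st.2 ++ [c]))
      (esc, acc)).2 = acc ++ fRef esc l := by
  induction l with
  | nil => intro esc acc; simp [fRef]
  | cons c r ih =>
      intro esc acc
      simp only [List.foldl_cons, fRef, ih]
      by_cases h : (c == ' ' && !esc) = true <;> simp [h]

-- Structural version of s.split(' ').
def split1 : List Char → List (List Char)
  | [] => [[]]
  | c :: r =>
      if c = ' ' then [] :: split1 r
      else match split1 r with
        | [] => [[c]]
        | p :: ps => (c :: p) :: ps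

theorem split1_space (r : List Char) : split1 (' ' :: r) = [] :: split1 r := by
  simp [split1]

theorem split1_cons_ne (c : Char) (r p : List Char) (ps : List (List Char))
    (hc : c ≠ ' ') (hs : split1 r = p :: ps) : split1 (c :: r) = (c :: p) :: ps := by
  simp [split1, hc, hs]

theorem split1_ne_nil (l : List Char) : split1 l ≠ [] := by
  cases l with
  | nil => simp [split1]
  | cons c r =>
      simp only [split1]
      split_ifs with h
      · simp
      · cases hs : split1 r <;> simp

theorem splitOn_go_eq :
    ∀ (fuel : Nat) (l cur : List Char) (acc : List (List Char)), l.length < fuel →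
    PySem.Chars.splitOn.go [' '] fuel l cur acc
      = acc.reverse ++ (split1 l).modifyHead (fun p => cur.reverse ++ p) := by
  intro fuel
  induction fuel with
  | zero => intro l cur acc h; omega
  | succ fuel ih =>
      intro l cur acc h
      cases l with
      | nil => simp [PySem.Chars.splitOn.go, split1]
      | cons c rest =>
          simp only [PySem.Chars.splitOn.go]
          by_cases hc : c = ' '
          · have hpre : [' '].isPrefixOf (c :: rest) = true := by
              simp [List.isPrefixOf, hc]
            rw [if_pos hpre]
            have hrec := ih rest [] (cur.reverse :: acc) (by simpa using Nat.lt_of_succ_lt_succ h)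
            simp only [List.length_cons, List.length_nil] at hrec ⊢
            rw [List.drop_one, List.tail_cons, hrec, hc, split1_space]
            simp only [List.modifyHead]
            cases hrest : split1 rest <;> simp
          · have hpre : [' '].isPrefixOf (c :: rest) = false := by
              simp only [List.isPrefixOf, Bool.and_eq_false_iff, beq_eq_false_iff_ne, ne_eq]
              left; intro hb; exact hc hb.symm
            rw [if_neg (by simp [hpre])]
            rw [ih rest (c :: cur) acc (by simpa using Nat.lt_of_succ_lt_succ h)]
            cases hs : split1 rest with
            | nil => exact absurd hs (split1_ne_nil rest)
            | cons p ps => rw [split1_cons_ne c rest p ps hc hs]; simp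

theorem splitOn_eq_split1 (l : List Char) :
    PySem.Chars.splitOn l [' '] = split1 l := by
  have h := splitOn_go_eq (l.length + 1) l [] [] (by omega)
  cases hs : split1 l with
  | nil => exact absurd hs (split1_ne_nil l)
  | cons p ps =>
      rw [hs] at h
      simpa [PySem.Chars.splitOn] using h

theorem endswith_append_singleton (xs : List Char) (c : Char) :
    PySem.Chars.endswith (xs ++ [c]) ['\\'] = (c == '\\') := by
  simp only [PySem.Chars.endswith, List.isSuffixOf, List.reverse_append]
  cases h : c == '\\' <;> simp_all [List.isPrefixOf, BEq.comm]

-- Main lemma: B's fold over the split parts equals the reference scan, from any prefix `res`.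
theorem bmain (l : List Char) : ∀ (res : List Char),
    ((split1 l).tail).foldl (fun res part =>
        res ++ (if PySem.Chars.endswith res ['\\'] then [' '] else ['\\', ' ']) ++ part)
      (res ++ (split1 l).headI)
      = res ++ fRef (PySem.Chars.endswith res ['\\']) l := by
  induction l with
  | nil => intro res; simp [split1, fRef]
  | cons c r ih =>
      intro res
      by_cases hc : c = ' '
      · subst hc
        rw [split1_space, List.tail_cons, List.headI_cons, List.append_nil]
        cases hs : split1 r with
        | nil => exact absurd hs (split1_ne_nil r)
        | cons p ps =>
            rw [List.foldl_cons]
            by_cases he : PySem.Chars.endswith res ['\\'] = true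
            · rw [he, if_pos rfl]
              have h1 : PySem.Chars.endswith (res ++ [' ']) ['\\'] = false := by
                rw [endswith_append_singleton]; decide
              have hrec := ih (res ++ [' '])
              rw [hs, List.tail_cons, List.headI_cons, h1] at hrec
              rw [List.append_assoc] at hrec ⊢
              rw [hrec]
              simp [fRef]
            · have he' : PySem.Chars.endswith res ['\\'] = false := by simpa using he
              rw [he', if_neg Bool.false_ne_true]
              have h1 : PySem.Chars.endswith (res ++ ['\\', ' ']) ['\\'] = false := by
                have hsplit : res ++ ['\\', ' '] = (res ++ ['\\']) ++ [' '] := by simp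
                rw [hsplit, endswith_append_singleton]; decide
              have hrec := ih (res ++ ['\\', ' '])
              rw [hs, List.tail_cons, List.headI_cons, h1] at hrec
              rw [List.append_assoc] at hrec ⊢
              rw [hrec]
              simp [fRef]
      · cases hs : split1 r with
        | nil => exact absurd hs (split1_ne_nil r)
        | cons p ps =>
            rw [split1_cons_ne c r p ps hc hs, List.tail_cons, List.headI_cons]
            have hcons : res ++ c :: p = (res ++ [c]) ++ p := by simp
            rw [hcons]
            have hrec := ih (res ++ [c])
            rw [hs, List.tail_cons, List.headI_cons, endswith_append_singleton] at hrec
            rw [hrec]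
            have hcs : (c == ' ') = false := by simpa using hc
            simp [fRef, hcs]

-- ===== VERDICT (by name: the statement is the Claim_ definition above) =====
theorem escape_space_py_spec : Claim_equal_escape_space_py := by
  intro s _
  unfold Spec_escape_space_py escape_space_py escape_space_py_alt
  rw [splitOn_eq_split1]
  have hb := bmain s.toList []
  have he : PySem.Chars.endswith ([] : List Char) ['\\'] = false := by decide
  rw [he] at hb
  cases hs : split1 s.toList with
  | nil => exact absurd hs (split1_ne_nil s.toList)
  | cons p ps =>
      rw [hs, List.tail_cons, List.headI_cons, List.nil_append] at hb
      simp only [aFold_eq, List.nil_append, hb]
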